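-- pv_equiv track=rewrite | github.com/BryanHoo/workflow | skills/workflow-project-check/scripts/common.py | detect_risk_tags
-- ===== SOURCE A (Python) =====
-- def detect_risk_tags(paths: list[str], entries: list[dict[str, str]], layers: list[str]) -> set[str]:
--     tags = {"local_quality"}
--     if not paths:
--         return tags
--
--     if all(is_doc_path(path) for path in paths):
--         return {"docs_only"}
--     if all(is_test_path(path) for path in paths):
--         return {"test_only"}
--
--     if len(layers) > 1:
--         tags.add("cross_layer")
--
--     if any(is_contract_path(path) for path in paths):
--         tags.add("contract_change")
--         tags.add("cross_layer")
--
--     if any(is_schema_path(path) for path in paths):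
--         tags.add("schema_change")
--         tags.add("contract_change")
--         tags.add("cross_layer")
--
--     if any(is_config_path(path) for path in paths):
--         tags.add("config_change")
--         tags.add("cross_layer")
--
--     if any(is_shared_path(path) for path in paths):
--         tags.add("shared_code_change")
--
--     if any(entry["status"].startswith("A") or entry["status"] == "??" for entry in entries):
--         tags.add("new_file")
--
--     return tags
--
-- def is_doc_path(path: str) -> bool:
--     lower = path.lower()
--     return lower.endswith(".md") or lower.startswith("docs/") or "/docs/" in lower
--
-- def is_test_path(path: str) -> bool:
--     lower = path.lower()
--     return any(
--         token in lower
--         for token in ["/test/", "/tests/", ".test.", ".spec.", "__tests__", "fixtures/"]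
--     )
--
-- def is_contract_path(path: str) -> bool:
--     lower = path.lower()
--     return any(
--         token in lower
--         for token in ["route", "/api/", "handler", "controller", "schema", "dto", "serializer", "graphql"]
--     )
--
-- def is_schema_path(path: str) -> bool:
--     lower = path.lower()
--     return any(
--         token in lower
--         for token in ["migration", "prisma", "drizzle", "/db/", ".sql", "schema.ts", "schema.prisma"]
--     )
--
-- def is_config_path(path: str) -> bool:
--     lower = path.lower()
--     config_names = [
--         ".env",
--         "config",
--         "settings",
--         "tsconfig",
--         "vite.config",
--         "next.config",
--         "eslint",
--         "prettier",
--         "vitest.config",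
--         "jest.config",
--     ]
--     return any(token in lower for token in config_names)
--
-- def is_shared_path(path: str) -> bool:
--     lower = path.lower()
--     return any(
--         token in lower
--         for token in ["/shared/", "/common/", "/lib/", "/utils/", "/core/", "/hooks/", "/constants/"]
--     )
-- ===== SOURCE B (Python) =====
-- TEST_TOKENS = ["/test/", "/tests/", ".test.", ".spec.", "__tests__", "fixtures/"]
-- CONTRACT_TOKENS = ["route", "/api/", "handler", "controller", "schema", "dto", "serializer", "graphql"]
-- SCHEMA_TOKENS = ["migration", "prisma", "drizzle", "/db/", ".sql", "schema.ts", "schema.prisma"]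
-- CONFIG_TOKENS = [".env", "config", "settings", "tsconfig", "vite.config", "next.config",
--                  "eslint", "prettier", "vitest.config", "jest.config"]
-- SHARED_TOKENS = ["/shared/", "/common/", "/lib/", "/utils/", "/core/", "/hooks/", "/constants/"]
--
--
-- def detect_risk_tags(paths: list[str], entries: list[dict[str, str]], layers: list[str]) -> set[str]:
--     if not paths:
--         return {"local_quality"}
--
--     # one pass over paths: lowercase each path once and accumulate six flags
--     all_doc = True
--     all_test = True
--     any_contract = any_schema = any_config = any_shared = False
--     for path in paths:
--         lower = path.lower()
--         if not (lower.endswith(".md") or lower.startswith("docs/") or "/docs/" in lower):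
--             all_doc = False
--         if not any(t in lower for t in TEST_TOKENS):
--             all_test = False
--         if any(t in lower for t in CONTRACT_TOKENS):
--             any_contract = True
--         if any(t in lower for t in SCHEMA_TOKENS):
--             any_schema = True
--         if any(t in lower for t in CONFIG_TOKENS):
--             any_config = True
--         if any(t in lower for t in SHARED_TOKENS):
--             any_shared = True
--
--     if all_doc:
--         return {"docs_only"}
--     if all_test:
--         return {"test_only"}
--
--     tags = {"local_quality"}
--     if len(layers) > 1:
--         tags.add("cross_layer")
--     if any_contract:
--         tags.add("contract_change")
--         tags.add("cross_layer")
--     if any_schema: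
--         tags.add("schema_change")
--         tags.add("contract_change")
--         tags.add("cross_layer")
--     if any_config:
--         tags.add("config_change")
--         tags.add("cross_layer")
--     if any_shared:
--         tags.add("shared_code_change")
--     if any(entry["status"].startswith("A") or entry["status"] == "??" for entry in entries):
--         tags.add("new_file")
--     return tags
-- ===== Notes on version B (the rewrite author's own statement) =====
-- stated objective: alternative
-- what changed: Replaces A's six independent full scans of paths (each re-lowercasing every path) with a single pass that lowercases each path once and accumulates six boolean flags, then builds the tag set from the flags.
import Mathlib
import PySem

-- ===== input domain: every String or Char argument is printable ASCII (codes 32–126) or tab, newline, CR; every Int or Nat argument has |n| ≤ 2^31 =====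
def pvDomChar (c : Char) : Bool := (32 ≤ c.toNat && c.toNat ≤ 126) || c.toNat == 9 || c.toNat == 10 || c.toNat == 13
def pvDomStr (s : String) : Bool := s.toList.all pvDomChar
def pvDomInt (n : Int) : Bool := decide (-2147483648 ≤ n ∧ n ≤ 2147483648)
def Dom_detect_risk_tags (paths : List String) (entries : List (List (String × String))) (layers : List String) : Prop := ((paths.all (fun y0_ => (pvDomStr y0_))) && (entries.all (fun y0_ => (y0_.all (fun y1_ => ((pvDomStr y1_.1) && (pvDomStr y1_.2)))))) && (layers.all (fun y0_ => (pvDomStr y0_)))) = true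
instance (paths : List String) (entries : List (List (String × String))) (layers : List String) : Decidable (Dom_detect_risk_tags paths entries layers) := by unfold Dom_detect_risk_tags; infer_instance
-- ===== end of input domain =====

-- B folds one pass over paths into six boolean flags instead of A's six separate scans; same results.

-- ===== PORT A =====
-- shared token predicates (each takes the already-lowercased path)
def pvDocL (lower : String) : Bool :=
  PySem.Str.endswith lower ".md" || PySem.Str.startswith lower "docs/" || PySem.Str.isIn "/docs/" lower

def pvTestL (lower : String) : Bool :=
  ["/test/", "/tests/", ".test.", ".spec.", "__tests__", "fixtures/"].any (fun t => PySem.Str.isIn t lower)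

def pvContractL (lower : String) : Bool :=
  ["route", "/api/", "handler", "controller", "schema", "dto", "serializer", "graphql"].any (fun t => PySem.Str.isIn t lower)

def pvSchemaL (lower : String) : Bool :=
  ["migration", "prisma", "drizzle", "/db/", ".sql", "schema.ts", "schema.prisma"].any (fun t => PySem.Str.isIn t lower)

def pvConfigL (lower : String) : Bool :=
  [".env", "config", "settings", "tsconfig", "vite.config", "next.config", "eslint", "prettier", "vitest.config", "jest.config"].any (fun t => PySem.Str.isIn t lower)

def pvSharedL (lower : String) : Bool :=
  ["/shared/", "/common/", "/lib/", "/utils/", "/core/", "/hooks/", "/constants/"].any (fun t => PySem.Str.isIn t lower)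

def is_doc_path (path : String) : Bool := pvDocL (PySem.Str.lower path)
def is_test_path (path : String) : Bool := pvTestL (PySem.Str.lower path)
def is_contract_path (path : String) : Bool := pvContractL (PySem.Str.lower path)
def is_schema_path (path : String) : Bool := pvSchemaL (PySem.Str.lower path)
def is_config_path (path : String) : Bool := pvConfigL (PySem.Str.lower path)
def is_shared_path (path : String) : Bool := pvSharedL (PySem.Str.lower path)

-- entry["status"] under Pre_ (every entry contains "status"); getD "" is exact there
def pvStatusNew (e : List (String × String)) : Bool :=
  let st := (PySem.Dict.mk e).getD "status" ""
  PySem.Str.startswith st "A" || st == "??"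

def detect_risk_tags (paths : List String) (entries : List (List (String × String))) (layers : List String) : List String :=
  let tags : PySem.Set String := PySem.Set.ofList ["local_quality"]
  if paths = [] then tags
  else if paths.all is_doc_path then PySem.Set.ofList ["docs_only"]
  else if paths.all is_test_path then PySem.Set.ofList ["test_only"]
  else
    let tags := if layers.length > 1 then PySem.Set.add tags "cross_layer" else tags
    let tags := if paths.any is_contract_path then
        PySem.Set.add (PySem.Set.add tags "contract_change") "cross_layer" else tags
    let tags := if paths.any is_schema_path then
        PySem.Set.add (PySem.Set.add (PySem.Set.add tags "schema_change") "contract_change") "cross_layer" else tags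
    let tags := if paths.any is_config_path then
        PySem.Set.add (PySem.Set.add tags "config_change") "cross_layer" else tags
    let tags := if paths.any is_shared_path then PySem.Set.add tags "shared_code_change" else tags
    if entries.any pvStatusNew then PySem.Set.add tags "new_file" else tags

-- ===== PORT B =====
def pvFlagsStep (st : Bool × Bool × Bool × Bool × Bool × Bool) (path : String) :
    Bool × Bool × Bool × Bool × Bool × Bool :=
  let lower := PySem.Str.lower path
  (st.1 && pvDocL lower, st.2.1 && pvTestL lower, st.2.2.1 || pvContractL lower,
   st.2.2.2.1 || pvSchemaL lower, st.2.2.2.2.1 || pvConfigL lower, st.2.2.2.2.2 || pvSharedL lower)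

def detect_risk_tags_alt (paths : List String) (entries : List (List (String × String))) (layers : List String) : List String :=
  if paths = [] then PySem.Set.ofList ["local_quality"]
  else
    let fl := paths.foldl pvFlagsStep (true, true, false, false, false, false)
    if fl.1 then PySem.Set.ofList ["docs_only"]
    else if fl.2.1 then PySem.Set.ofList ["test_only"]
    else
      let tags : PySem.Set String := PySem.Set.ofList ["local_quality"]
      let tags := if layers.length > 1 then PySem.Set.add tags "cross_layer" else tags
      let tags := if fl.2.2.1 then
          PySem.Set.add (PySem.Set.add tags "contract_change") "cross_layer" else tags
      let tags := if fl.2.2.2.1 then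
          PySem.Set.add (PySem.Set.add (PySem.Set.add tags "schema_change") "contract_change") "cross_layer" else tags
      let tags := if fl.2.2.2.2.1 then
          PySem.Set.add (PySem.Set.add tags "config_change") "cross_layer" else tags
      let tags := if fl.2.2.2.2.2 then PySem.Set.add tags "shared_code_change" else tags
      if entries.any pvStatusNew then PySem.Set.add tags "new_file" else tags

-- ===== PRECONDITION & SPEC =====
-- Pre_ excludes inputs on which entry["status"] could raise KeyError: it admits only inputs where
-- every entry has a "status" key, or where A never reaches the entries scan (empty paths, all-doc
-- or all-test paths); it is narrower than strictly needed when an earlier entry short-circuits the scan.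
def Pre_detect_risk_tags (paths : List String) (entries : List (List (String × String))) (layers : List String) : Prop :=
  (∀ e ∈ entries, (PySem.Dict.mk e).contains "status" = true) ∨
  paths = [] ∨ paths.all is_doc_path = true ∨ paths.all is_test_path = true
instance (paths : List String) (entries : List (List (String × String))) (layers : List String) : Decidable (Pre_detect_risk_tags paths entries layers) := by unfold Pre_detect_risk_tags; infer_instance

def pvWitness_detect_risk_tags : List String × (List (List (String × String))) × List String :=
  (["src/app.py"], [[("status", "M")]], ["api"])

def Spec_detect_risk_tags (paths : List String) (entries : List (List (String × String))) (layers : List String) (out : List String) : Prop := out = detect_risk_tags_alt paths entries layers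
instance (paths : List String) (entries : List (List (String × String))) (layers : List String) (out : List String) : Decidable (Spec_detect_risk_tags paths entries layers out) := by unfold Spec_detect_risk_tags; infer_instance

-- ===== CLAIM (what is proved, stated in full; the proofs are below) =====
def Claim_equal_detect_risk_tags : Prop := ∀ (paths : List String) (entries : List (List (String × String))) (layers : List String), Dom_detect_risk_tags paths entries layers → Pre_detect_risk_tags paths entries layers → Spec_detect_risk_tags paths entries layers (detect_risk_tags paths entries layers)

-- ===== LEMMAS AND PROOFS =====
-- the one-pass fold computes exactly A's six scans
lemma pvFlags_fold (paths : List String) (b1 b2 b3 b4 b5 b6 : Bool) :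
    paths.foldl pvFlagsStep (b1, b2, b3, b4, b5, b6) =
      (b1 && paths.all is_doc_path, b2 && paths.all is_test_path,
       b3 || paths.any is_contract_path, b4 || paths.any is_schema_path,
       b5 || paths.any is_config_path, b6 || paths.any is_shared_path) := by
  induction paths generalizing b1 b2 b3 b4 b5 b6 with
  | nil => simp
  | cons p ps ih =>
      simp only [List.foldl_cons, pvFlagsStep, List.all_cons, List.any_cons, ih,
        is_doc_path, is_test_path, is_contract_path, is_schema_path, is_config_path,
        is_shared_path, Bool.and_assoc, Bool.or_assoc]

-- ===== VERDICT (by name: the statement is the Claim_ definition above) =====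
theorem detect_risk_tags_spec : Claim_equal_detect_risk_tags := by
  intro paths entries layers _ _
  unfold Spec_detect_risk_tags detect_risk_tags detect_risk_tags_alt
  rw [pvFlags_fold]
  simp
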